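-- pv_equiv track=rewrite | github.com/RajeshRam78/Image_Steganographer | Image_Steganographer/main.py | LSB_decode_byte
-- ===== SOURCE A (Python) =====
-- def LSB_decode_byte(data):
--     ret_val = 0
--     for i in range(0, 8):
--         if data[i] & 0x01:
--             ret_val |= 0x80
--         else:
--             ret_val &= 0x7F
--         if i != 7:
--             ret_val >>= 1
--     return ret_val
-- ===== SOURCE B (Python) =====
-- def LSB_decode_byte(data):
--     return sum((data[i] & 1) << i for i in range(8))
-- ===== Notes on version B (the rewrite author's own statement) =====
-- stated objective: simpler
-- what changed: B assembles the byte in one pass by OR/summing each LSB shifted to its absolute position (sum((data[i]&1)<<i)), instead of A's shift-register accumulator that sets bit 7 and right-shifts after every step; no conditional branches or masking accumulator remain.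
import Mathlib
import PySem

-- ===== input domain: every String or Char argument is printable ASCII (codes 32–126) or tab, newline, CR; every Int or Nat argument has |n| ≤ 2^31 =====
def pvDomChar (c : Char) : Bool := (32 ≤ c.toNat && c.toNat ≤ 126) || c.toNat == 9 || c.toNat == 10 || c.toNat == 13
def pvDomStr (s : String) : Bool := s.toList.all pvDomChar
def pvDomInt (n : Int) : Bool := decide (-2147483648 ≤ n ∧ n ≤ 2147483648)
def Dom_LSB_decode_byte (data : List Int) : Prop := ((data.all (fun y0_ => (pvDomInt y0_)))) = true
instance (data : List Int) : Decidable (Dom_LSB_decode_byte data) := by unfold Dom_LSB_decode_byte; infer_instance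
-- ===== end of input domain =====

-- B builds the byte by summing each LSB shifted to its absolute position, replacing A's
-- shift-register accumulator (set bit 7, then right-shift); objective: simpler.

-- ===== PORT A =====
-- data[i] inside Pre_ is in range; pyGetD's default is never reached there.
def LSB_decode_byte (data : List Int) : Int :=
  (PySem.List.pyRange 0 8 1).foldl (fun ret_val i =>
    let r := if PySem.Int.band (PySem.List.pyGetD data i 0) 1 ≠ 0
             then PySem.Int.bor ret_val 0x80
             else PySem.Int.band ret_val 0x7F
    if i ≠ 7 then r >>> 1 else r) 0

-- ===== PORT B =====
def LSB_decode_byte_alt (data : List Int) : Int :=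
  (PySem.List.pyRange 0 8 1).foldl (fun acc i =>
    acc + (PySem.Int.band (PySem.List.pyGetD data i 0) 1 <<< i.toNat)) 0

-- ===== PRECONDITION & SPEC =====
-- Pre_ excludes lists with fewer than 8 elements, on which Python A raises IndexError.
def Pre_LSB_decode_byte (data : List Int) : Prop := 8 ≤ data.length
instance (data : List Int) : Decidable (Pre_LSB_decode_byte data) := by unfold Pre_LSB_decode_byte; infer_instance
def pvWitness_LSB_decode_byte : List Int := [1, 0, 1, 0, 0, 1, 1, 0]

def Spec_LSB_decode_byte (data : List Int) (out : Int) : Prop := out = LSB_decode_byte_alt data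
instance (data : List Int) (out : Int) : Decidable (Spec_LSB_decode_byte data out) := by unfold Spec_LSB_decode_byte; infer_instance

-- ===== CLAIM (what is proved, stated in full; the proofs are below) =====
def Claim_equal_LSB_decode_byte : Prop := ∀ (data : List Int), Dom_LSB_decode_byte data → Pre_LSB_decode_byte data → Spec_LSB_decode_byte data (LSB_decode_byte data)

-- ===== LEMMAS AND PROOFS =====

theorem pv_band_one_cases (a : Int) : PySem.Int.band a 1 = 0 ∨ PySem.Int.band a 1 = 1 := by
  rw [PySem.Int.band_one]
  have h1 := PySem.Int.mod_nonneg a (b := 2) (by omega)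
  have h2 := PySem.Int.mod_lt a (b := 2) (by omega)
  omega

-- ===== VERDICT (by name: the statement is the Claim_ definition above) =====
set_option maxHeartbeats 1000000 in
theorem LSB_decode_byte_spec : Claim_equal_LSB_decode_byte := by
  intro data _ hpre
  unfold Pre_LSB_decode_byte at hpre
  unfold Spec_LSB_decode_byte
  rcases data with _|⟨d0,_|⟨d1,_|⟨d2,_|⟨d3,_|⟨d4,_|⟨d5,_|⟨d6,_|⟨d7,rest⟩⟩⟩⟩⟩⟩⟩⟩ <;>
    simp only [List.length] at hpre <;> try omega
  have g0 : PySem.List.pyGetD (d0::d1::d2::d3::d4::d5::d6::d7::rest) 0 0 = d0 := by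
    rw [show (0:Int) = ((0:Nat):Int) by norm_num, PySem.List.pyGetD_ofNat _ _ _ (by simp)]
    simp
  have q0 : PySem.List.pyGetD [PySem.Int.band d0 1, PySem.Int.band d1 1, PySem.Int.band d2 1, PySem.Int.band d3 1, PySem.Int.band d4 1, PySem.Int.band d5 1, PySem.Int.band d6 1, PySem.Int.band d7 1] 0 0 = PySem.Int.band d0 1 := by
    rw [show (0:Int) = ((0:Nat):Int) by norm_num, PySem.List.pyGetD_ofNat _ _ _ (by simp)]
    simp
  have g1 : PySem.List.pyGetD (d0::d1::d2::d3::d4::d5::d6::d7::rest) 1 0 = d1 := by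
    rw [show (1:Int) = ((1:Nat):Int) by norm_num, PySem.List.pyGetD_ofNat _ _ _ (by simp)]
    simp
  have q1 : PySem.List.pyGetD [PySem.Int.band d0 1, PySem.Int.band d1 1, PySem.Int.band d2 1, PySem.Int.band d3 1, PySem.Int.band d4 1, PySem.Int.band d5 1, PySem.Int.band d6 1, PySem.Int.band d7 1] 1 0 = PySem.Int.band d1 1 := by
    rw [show (1:Int) = ((1:Nat):Int) by norm_num, PySem.List.pyGetD_ofNat _ _ _ (by simp)]
    simp
  have g2 : PySem.List.pyGetD (d0::d1::d2::d3::d4::d5::d6::d7::rest) 2 0 = d2 := by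
    rw [show (2:Int) = ((2:Nat):Int) by norm_num, PySem.List.pyGetD_ofNat _ _ _ (by simp)]
    simp
  have q2 : PySem.List.pyGetD [PySem.Int.band d0 1, PySem.Int.band d1 1, PySem.Int.band d2 1, PySem.Int.band d3 1, PySem.Int.band d4 1, PySem.Int.band d5 1, PySem.Int.band d6 1, PySem.Int.band d7 1] 2 0 = PySem.Int.band d2 1 := by
    rw [show (2:Int) = ((2:Nat):Int) by norm_num, PySem.List.pyGetD_ofNat _ _ _ (by simp)]
    simp
  have g3 : PySem.List.pyGetD (d0::d1::d2::d3::d4::d5::d6::d7::rest) 3 0 = d3 := by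
    rw [show (3:Int) = ((3:Nat):Int) by norm_num, PySem.List.pyGetD_ofNat _ _ _ (by simp)]
    simp
  have q3 : PySem.List.pyGetD [PySem.Int.band d0 1, PySem.Int.band d1 1, PySem.Int.band d2 1, PySem.Int.band d3 1, PySem.Int.band d4 1, PySem.Int.band d5 1, PySem.Int.band d6 1, PySem.Int.band d7 1] 3 0 = PySem.Int.band d3 1 := by
    rw [show (3:Int) = ((3:Nat):Int) by norm_num, PySem.List.pyGetD_ofNat _ _ _ (by simp)]
    simp
  have g4 : PySem.List.pyGetD (d0::d1::d2::d3::d4::d5::d6::d7::rest) 4 0 = d4 := by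
    rw [show (4:Int) = ((4:Nat):Int) by norm_num, PySem.List.pyGetD_ofNat _ _ _ (by simp)]
    simp
  have q4 : PySem.List.pyGetD [PySem.Int.band d0 1, PySem.Int.band d1 1, PySem.Int.band d2 1, PySem.Int.band d3 1, PySem.Int.band d4 1, PySem.Int.band d5 1, PySem.Int.band d6 1, PySem.Int.band d7 1] 4 0 = PySem.Int.band d4 1 := by
    rw [show (4:Int) = ((4:Nat):Int) by norm_num, PySem.List.pyGetD_ofNat _ _ _ (by simp)]
    simp
  have g5 : PySem.List.pyGetD (d0::d1::d2::d3::d4::d5::d6::d7::rest) 5 0 = d5 := by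
    rw [show (5:Int) = ((5:Nat):Int) by norm_num, PySem.List.pyGetD_ofNat _ _ _ (by simp)]
    simp
  have q5 : PySem.List.pyGetD [PySem.Int.band d0 1, PySem.Int.band d1 1, PySem.Int.band d2 1, PySem.Int.band d3 1, PySem.Int.band d4 1, PySem.Int.band d5 1, PySem.Int.band d6 1, PySem.Int.band d7 1] 5 0 = PySem.Int.band d5 1 := by
    rw [show (5:Int) = ((5:Nat):Int) by norm_num, PySem.List.pyGetD_ofNat _ _ _ (by simp)]
    simp
  have g6 : PySem.List.pyGetD (d0::d1::d2::d3::d4::d5::d6::d7::rest) 6 0 = d6 := by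
    rw [show (6:Int) = ((6:Nat):Int) by norm_num, PySem.List.pyGetD_ofNat _ _ _ (by simp)]
    simp
  have q6 : PySem.List.pyGetD [PySem.Int.band d0 1, PySem.Int.band d1 1, PySem.Int.band d2 1, PySem.Int.band d3 1, PySem.Int.band d4 1, PySem.Int.band d5 1, PySem.Int.band d6 1, PySem.Int.band d7 1] 6 0 = PySem.Int.band d6 1 := by
    rw [show (6:Int) = ((6:Nat):Int) by norm_num, PySem.List.pyGetD_ofNat _ _ _ (by simp)]
    simp
  have g7 : PySem.List.pyGetD (d0::d1::d2::d3::d4::d5::d6::d7::rest) 7 0 = d7 := by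
    rw [show (7:Int) = ((7:Nat):Int) by norm_num, PySem.List.pyGetD_ofNat _ _ _ (by simp)]
    simp
  have q7 : PySem.List.pyGetD [PySem.Int.band d0 1, PySem.Int.band d1 1, PySem.Int.band d2 1, PySem.Int.band d3 1, PySem.Int.band d4 1, PySem.Int.band d5 1, PySem.Int.band d6 1, PySem.Int.band d7 1] 7 0 = PySem.Int.band d7 1 := by
    rw [show (7:Int) = ((7:Nat):Int) by norm_num, PySem.List.pyGetD_ofNat _ _ _ (by simp)]
    simp
  have hr : PySem.List.pyRange 0 8 1 = [0,1,2,3,4,5,6,7] := by decide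
  have bb : ∀ a : Int, PySem.Int.band (PySem.Int.band a 1) 1 = PySem.Int.band a 1 := by
    intro a; rcases pv_band_one_cases a with h | h <;> rw [h] <;> decide
  have hA : LSB_decode_byte (d0::d1::d2::d3::d4::d5::d6::d7::rest) = LSB_decode_byte [PySem.Int.band d0 1, PySem.Int.band d1 1, PySem.Int.band d2 1, PySem.Int.band d3 1, PySem.Int.band d4 1, PySem.Int.band d5 1, PySem.Int.band d6 1, PySem.Int.band d7 1] := by
    unfold LSB_decode_byte
    rw [hr]
    refine PySem.List.foldl_congr_mem _ _ _ _ ?_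
    intro acc x hx
    fin_cases hx <;> simp only [g0, g1, g2, g3, g4, g5, g6, g7, q0, q1, q2, q3, q4, q5, q6, q7, bb]
  have hB : LSB_decode_byte_alt (d0::d1::d2::d3::d4::d5::d6::d7::rest) = LSB_decode_byte_alt [PySem.Int.band d0 1, PySem.Int.band d1 1, PySem.Int.band d2 1, PySem.Int.band d3 1, PySem.Int.band d4 1, PySem.Int.band d5 1, PySem.Int.band d6 1, PySem.Int.band d7 1] := by
    unfold LSB_decode_byte_alt
    rw [hr]
    refine PySem.List.foldl_congr_mem _ _ _ _ ?_
    intro acc x hx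
    fin_cases hx <;> simp only [g0, g1, g2, g3, g4, g5, g6, g7, q0, q1, q2, q3, q4, q5, q6, q7, bb]
  rw [hA, hB]
  rcases pv_band_one_cases d0 with h0 | h0 <;>
  rcases pv_band_one_cases d1 with h1 | h1 <;>
  rcases pv_band_one_cases d2 with h2 | h2 <;>
  rcases pv_band_one_cases d3 with h3 | h3 <;>
  rcases pv_band_one_cases d4 with h4 | h4 <;>
  rcases pv_band_one_cases d5 with h5 | h5 <;>
  rcases pv_band_one_cases d6 with h6 | h6 <;>
  rcases pv_band_one_cases d7 with h7 | h7 <;>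
    rw [h0, h1, h2, h3, h4, h5, h6, h7] <;> decide
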